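-- pv_equiv track=rewrite | github.com/aliwo/swblog | _drafts/kakao_blind_2019/mooji_live2.py | solution
-- ===== SOURCE A (Python) =====
-- def solution(food_times, k):
--     i = 0
--     while k > 0:
--         k -= 1
--         food_times[i] -= 1
--         if not food_times:
--             return -1
--         i = i + 1 if i + 1 < len(food_times) else 0
--
--     return i + 1 if i + 1 <= len(food_times) else 0
-- ===== SOURCE B (Python) =====
-- def solution(food_times, k):
--     n = len(food_times)
--     if k <= 0:
--         return 1 if n else 0
--     return k % n + 1
-- ===== Notes on version B (the rewrite author's own statement) =====
-- stated objective: faster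
-- what changed: Replaced the k-iteration cyclic decrement loop with the closed form (k % n) + 1 (1 or 0 for k <= 0), since the loop's final index is k mod n regardless of the food values.
-- outside the precondition, e.g. on solution([], 1): A raises IndexError, B raises ZeroDivisionError
import Mathlib
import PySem

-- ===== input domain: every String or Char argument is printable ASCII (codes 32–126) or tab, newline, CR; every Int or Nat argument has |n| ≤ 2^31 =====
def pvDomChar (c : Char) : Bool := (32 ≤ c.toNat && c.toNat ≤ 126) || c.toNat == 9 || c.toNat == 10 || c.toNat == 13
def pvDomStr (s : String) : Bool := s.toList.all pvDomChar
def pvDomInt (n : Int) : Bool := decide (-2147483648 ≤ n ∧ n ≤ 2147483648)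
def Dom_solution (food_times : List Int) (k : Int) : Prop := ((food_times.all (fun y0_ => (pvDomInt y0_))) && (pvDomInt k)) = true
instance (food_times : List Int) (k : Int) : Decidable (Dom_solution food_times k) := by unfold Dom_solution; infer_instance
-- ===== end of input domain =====

-- B replaces A's k-step cyclic loop by the closed form (k % n) + 1: faster (O(1) vs O(k)).
-- A mutates food_times in place (decrements entries); B does not — the equivalence proved is about the return value only.

-- ===== PORT A =====
-- the while loop, recursing on k (the guard is k > 0, k decreases by 1 each pass).
-- food_times[i] -= 1 : the index i here is always nonnegative and (on Pre_) in range, so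
-- List.set i.toNat with the pyGet? value is exact; out-of-range (IndexError) inputs are excluded by Pre_.
def solutionLoop (food_times : List Int) (k : Int) (i : Int) : Int :=
  if hk : k > 0 then
    let k' := k - 1
    let ft' := food_times.set i.toNat (((PySem.List.pyGet? food_times i).getD 0) - 1)
    if ft' = [] then -1
    else
      let i' := if i + 1 < (ft'.length : Int) then i + 1 else 0
      solutionLoop ft' k' i'
  else
    if i + 1 ≤ (food_times.length : Int) then i + 1 else 0
termination_by k.toNat
decreasing_by omega

def solution (food_times : List Int) (k : Int) : Int :=
  solutionLoop food_times k 0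

-- ===== PORT B =====
def solution_alt (food_times : List Int) (k : Int) : Int :=
  let n : Int := food_times.length
  if k ≤ 0 then (if n ≠ 0 then 1 else 0)
  else PySem.Int.mod k n + 1

-- ===== PRECONDITION & SPEC =====
-- A raises IndexError (and B ZeroDivisionError) on an empty list with k > 0; those inputs are excluded.
def Pre_solution (food_times : List Int) (k : Int) : Prop := k ≤ 0 ∨ food_times ≠ []
instance (food_times : List Int) (k : Int) : Decidable (Pre_solution food_times k) := by unfold Pre_solution; infer_instance
def pvWitness_solution : List Int × Int := ([3, 1, 2], 5)
def Spec_solution (food_times : List Int) (k : Int) (out : Int) : Prop := out = solution_alt food_times k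
instance (food_times : List Int) (k : Int) (out : Int) : Decidable (Spec_solution food_times k out) := by unfold Spec_solution; infer_instance

-- ===== CLAIM (what is proved, stated in full; the proofs are below) =====
def Claim_equal_solution : Prop := ∀ (food_times : List Int) (k : Int), Dom_solution food_times k → Pre_solution food_times k → Spec_solution food_times k (solution food_times k)

-- ===== LEMMAS AND PROOFS =====

-- Loop invariant: for a nonempty list and 0 ≤ i < n, the loop returns (i + k) % n + 1 (i + 1 when k ≤ 0).
theorem solutionLoop_eq (food_times : List Int) (k i : Int)
    (hne : food_times ≠ []) (h0 : 0 ≤ i) (hi : i < (food_times.length : Int)) :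
    solutionLoop food_times k i =
      if k ≤ 0 then i + 1 else (i + k) % (food_times.length : Int) + 1 := by
  by_cases hk : k > 0
  · generalize hfuel : k.toNat = fuel
    induction fuel generalizing food_times k i with
    | zero => omega
    | succ m ih =>
      rw [solutionLoop]
      have hn : 0 < food_times.length := List.length_pos_iff.mpr hne
      have hir : i.toNat < food_times.length := by omega
      set ft' := food_times.set i.toNat (((PySem.List.pyGet? food_times i).getD 0) - 1) with hft'
      have hlen : ft'.length = food_times.length := by simp [hft']
      have hne' : ft' ≠ [] := by
        intro h; rw [h] at hlen; simp at hlen; omega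
      simp only [hk, dif_pos, if_neg hne']
      set i' : Int := if i + 1 < (ft'.length : Int) then i + 1 else 0 with hi'
      have hi'0 : 0 ≤ i' := by rw [hi']; split <;> omega
      have hi'lt : i' < (ft'.length : Int) := by rw [hi']; split <;> [omega; omega]
      have hmod : i' = (i + 1) % (food_times.length : Int) := by
        rw [hi', hlen]
        split
        · rw [Int.emod_eq_of_lt (by omega) (by omega)]
        · have : i + 1 = (food_times.length : Int) := by omega
          rw [this, Int.emod_self]
      by_cases hk1 : k - 1 ≤ 0
      · -- last iteration: loop returns i' + 1
        rw [solutionLoop]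
        simp only [show ¬ (k - 1 > 0) from by omega, dif_neg, not_false_iff]
        have h1 : k = 1 := by omega
        rw [if_pos (by omega), if_neg (by omega), hmod, h1]
      · rw [ih ft' (k - 1) i' hne' hi'0 hi'lt (by omega) (by omega)]
        rw [if_neg hk1, if_neg (by omega), hlen, hmod]
        congr 1
        rw [Int.emod_add_emod]
        congr 1
        ring
  · rw [solutionLoop]
    simp only [hk, dif_neg, not_false_iff]
    rw [if_pos (by omega), if_pos (by omega)]

theorem solution_spec : Claim_equal_solution := by
  intro food_times k _ hpre
  unfold Spec_solution solution solution_alt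
  cases food_times with
  | nil =>
    rcases hpre with hk | hne
    · rw [solutionLoop]
      simp only [show ¬ ((k : Int) > 0) from by omega, dif_neg, not_false_iff]
      simp [hk]
    · exact absurd rfl hne
  | cons x xs =>
    have hne : (x :: xs : List Int) ≠ [] := by simp
    rw [solutionLoop_eq _ _ _ hne (by omega) (by simp)]
    by_cases hk : k ≤ 0
    · simp [hk]
      omega
    · rw [if_neg hk, if_neg hk]
      have hpos : (0:Int) < ((x :: xs).length : Int) := by simp
      rw [PySem.Int.mod_eq_emod_of_pos hpos]
      simp

-- ===== VERDICT (by name: the statement is the Claim_ definition above) =====
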